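-- pv_equiv track=rewrite | github.com/larny/srt_to_speech | all_functions.py | build_all_lists
-- ===== SOURCE A (Python) =====
-- def contat_lists(list1, list2):
--     new_list = []
--     for i in range(len(list1)):
--         start_time, end_time  = list1[i]
--         new_list.append(start_time + ';' + end_time + ';' + list2[i])
--     return new_list
--
-- def build_all_lists(raw_text):
--     spt1 = raw_text.split('Dialogue: 0,')
--     timecode_list = []
--     words_list = []
--     for item in spt1[1:]:
--         spt2 = item.split(',')
--         words_start = item.rfind(',,')
--         words_ = item[words_start + 2: -1]
--         timecode_list.append(spt2[:2])
--         words_list.append(words_.title())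
--     all_list = contat_lists(timecode_list, words_list)
--     return all_list
-- ===== SOURCE B (Python) =====
-- def build_all_lists(raw_text):
--     result = []
--     for chunk in raw_text.split('Dialogue: 0,')[1:]:
--         start_time, end_time = chunk.split(',')[:2]
--         words = chunk[chunk.rfind(',,') + 2:-1].title()
--         result.append(start_time + ';' + end_time + ';' + words)
--     return result
-- ===== Notes on version B (the rewrite author's own statement) =====
-- stated objective: simpler
-- what changed: B drops the contat_lists helper and the two parallel lists, producing each output string directly in a single pass over the chunks.
import Mathlib
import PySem

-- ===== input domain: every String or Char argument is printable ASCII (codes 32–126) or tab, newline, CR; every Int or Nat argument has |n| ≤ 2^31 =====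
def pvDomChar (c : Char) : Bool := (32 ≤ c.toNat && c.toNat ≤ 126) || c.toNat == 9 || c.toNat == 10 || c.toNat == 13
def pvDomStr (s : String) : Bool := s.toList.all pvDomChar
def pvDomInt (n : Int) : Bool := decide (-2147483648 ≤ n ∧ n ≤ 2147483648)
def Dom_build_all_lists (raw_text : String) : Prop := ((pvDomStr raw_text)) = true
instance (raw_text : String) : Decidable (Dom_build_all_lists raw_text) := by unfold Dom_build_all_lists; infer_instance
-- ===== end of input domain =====

-- B fuses A's two parallel-list passes plus the contat_lists index loop into one direct pass; objective: simpler (no speed claim).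

-- ===== PORT A =====
-- exact port of ASCII str.title(): a letter is uppercased after a non-letter, lowercased after a letter
def pyTitleAux : List Char → Bool → List Char
  | [], _ => []
  | c :: cs, prev =>
    if c.isAlpha then (if prev then c.toLower else c.toUpper) :: pyTitleAux cs true
    else c :: pyTitleAux cs false

def pyTitle (s : String) : String := String.ofList (pyTitleAux s.toList false)

-- 'for i in range(len(list1)): start,end = list1[i]; append(...)' as parallel structural recursion;
-- an element that is not an exactly-two list (Python: ValueError, outside Pre_) is skipped
def contat_lists : List (List String) → List String → List String
  | p :: rest, w :: ws =>
    (match p with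
     | [start_time, end_time] => [start_time ++ ";" ++ end_time ++ ";" ++ w]
     | _ => []) ++ contat_lists rest ws
  | _, _ => []

def build_all_lists (raw_text : String) : List String :=
  let spt1 := (PySem.Str.split? raw_text "Dialogue: 0,").getD []
  let tw := (PySem.List.slice spt1 (some 1) none).foldl
    (fun (acc : List (List String) × List String) item =>
      let spt2 := (PySem.Str.split? item ",").getD []
      let words_start := PySem.Str.rfind item ",,"
      let words_ := PySem.Str.slice item (some (words_start + 2)) (some (-1))
      (acc.1 ++ [PySem.List.slice spt2 none (some 2)], acc.2 ++ [pyTitle words_]))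
    ([], [])
  contat_lists tw.1 tw.2

-- ===== PORT B =====
-- single fused pass; a chunk whose comma-split has fewer than two pieces (Python: ValueError, outside Pre_) yields none
def build_all_lists_alt (raw_text : String) : List String :=
  ((PySem.Str.split? raw_text "Dialogue: 0,").getD []).tail.filterMap fun chunk =>
    match PySem.List.slice ((PySem.Str.split? chunk ",").getD []) none (some 2) with
    | [start_time, end_time] =>
      some (start_time ++ ";" ++ end_time ++ ";" ++
        pyTitle (PySem.Str.slice chunk (some (PySem.Str.rfind chunk ",," + 2)) (some (-1))))
    | _ => none

-- ===== PRECONDITION & SPEC =====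
-- Pre_ excludes exactly the inputs on which Python A raises ValueError: a dialogue chunk containing no comma
-- makes the two-element unpack in contat_lists fail (B raises the same ValueError there).
def Pre_build_all_lists (raw_text : String) : Prop :=
  ∀ chunk ∈ ((PySem.Str.split? raw_text "Dialogue: 0,").getD []).tail, PySem.Str.isIn "," chunk = true
instance (raw_text : String) : Decidable (Pre_build_all_lists raw_text) := by unfold Pre_build_all_lists; infer_instance

def pvWitness_build_all_lists : String :=
  "Dialogue: 0,0:01,0:02,,hi\n"

def Spec_build_all_lists (raw_text : String) (out : List String) : Prop := out = build_all_lists_alt raw_text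
instance (raw_text : String) (out : List String) : Decidable (Spec_build_all_lists raw_text out) := by unfold Spec_build_all_lists; infer_instance

-- ===== CLAIM (what is proved, stated in full; the proofs are below) =====
def Claim_equal_build_all_lists : Prop := ∀ (raw_text : String), Dom_build_all_lists raw_text → Pre_build_all_lists raw_text → Spec_build_all_lists raw_text (build_all_lists raw_text)

-- ===== LEMMAS AND PROOFS =====

-- the per-chunk pieces A's loop collects
def pvT (item : String) : List String :=
  PySem.List.slice ((PySem.Str.split? item ",").getD []) none (some 2)
def pvW (item : String) : String :=
  pyTitle (PySem.Str.slice item (some (PySem.Str.rfind item ",," + 2)) (some (-1)))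

theorem pv_foldl_maps (cs : List String) (t : List (List String)) (w : List String) :
    cs.foldl
      (fun (acc : List (List String) × List String) item =>
        (acc.1 ++ [PySem.List.slice ((PySem.Str.split? item ",").getD []) none (some 2)],
         acc.2 ++ [pyTitle (PySem.Str.slice item (some (PySem.Str.rfind item ",," + 2)) (some (-1)))]))
      (t, w) = (t ++ cs.map pvT, w ++ cs.map pvW) := by
  induction cs generalizing t w with
  | nil => simp
  | cons c cs ih =>
    rw [List.foldl_cons, ih]
    simp [pvT, pvW]

theorem pv_contat_eq_filterMap (cs : List String) :
    contat_lists (cs.map pvT) (cs.map pvW) =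
      cs.filterMap (fun chunk =>
        match PySem.List.slice ((PySem.Str.split? chunk ",").getD []) none (some 2) with
        | [start_time, end_time] =>
          some (start_time ++ ";" ++ end_time ++ ";" ++
            pyTitle (PySem.Str.slice chunk (some (PySem.Str.rfind chunk ",," + 2)) (some (-1))))
        | _ => none) := by
  induction cs with
  | nil => rfl
  | cons c cs ih =>
    simp only [List.map_cons, contat_lists, List.filterMap_cons]
    rcases h : pvT c with _ | ⟨a, _ | ⟨b, _ | _⟩⟩ <;>
      simp_all [pvT, pvW]

-- ===== VERDICT (by name: the statement is the Claim_ definition above) =====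
theorem build_all_lists_spec : Claim_equal_build_all_lists := by
  intro raw_text _ _
  show build_all_lists raw_text = build_all_lists_alt raw_text
  simp only [build_all_lists, build_all_lists_alt, PySem.List.slice_from_one]
  rw [pv_foldl_maps]
  exact pv_contat_eq_filterMap _
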